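-- pv_equiv track=rewrite | github.com/JaySalma/Python_Advent_of_Code | Day13_2.py | get_busses
-- ===== SOURCE A (Python) =====
-- def get_busses(input):
--     lines_raw=input[1]
--     line=""
--     bus_lines=[]
--     t_plus=[]
--     t=0
--     for char in lines_raw:
--         if char!="x" and char!=",":
--             line+=char
--         elif char==",":
--             if line!="":
--                 bus_lines.append(int(line))
--                 line=""
--                 t_plus.append(t)
--             t+=1
--     next
--     if not line=="":
--         bus_lines.append(int(line))
--         line=""
--         t_plus.append(t)
--     return bus_lines,t_plus
-- ===== SOURCE B (Python) =====
-- def get_busses(input):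
--     fields = input[1].split(",")
--     bus_lines = []
--     t_plus = []
--     for t, field in enumerate(fields):
--         field = field.replace("x", "")
--         if field != "":
--             bus_lines.append(int(field))
--             t_plus.append(t)
--     return bus_lines, t_plus
-- ===== Notes on version B (the rewrite author's own statement) =====
-- stated objective: simpler
-- what changed: Replaces A's per-character accumulator/comma-counter state machine with a token-level pass: split the line on ',', enumerate the fields, strip 'x' characters from each field and keep int(field) with its offset when non-empty.
import Mathlib
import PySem

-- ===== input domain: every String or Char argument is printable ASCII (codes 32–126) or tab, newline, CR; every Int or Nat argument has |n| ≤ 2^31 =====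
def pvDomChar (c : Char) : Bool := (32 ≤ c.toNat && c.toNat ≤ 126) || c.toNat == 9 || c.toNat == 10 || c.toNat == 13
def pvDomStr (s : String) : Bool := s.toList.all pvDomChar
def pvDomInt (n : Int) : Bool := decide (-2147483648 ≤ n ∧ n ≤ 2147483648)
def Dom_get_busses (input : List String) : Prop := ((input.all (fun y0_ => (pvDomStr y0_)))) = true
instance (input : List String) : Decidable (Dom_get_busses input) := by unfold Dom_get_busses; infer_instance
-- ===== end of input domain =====

-- B replaces A's per-character accumulator-and-comma-counter state machine with a
-- token-level pass over the ','-split fields (simpler decomposition, same cost).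

-- ===== PORT A =====
-- A-side helpers: one iteration of A's character loop, and the final flush after the loop.
-- int(line) is PySem.Int.ofChars?; Pre_ guarantees it succeeds wherever A calls it, so .getD 0 is never the value.
def stepA (st : List Char × List Int × List Int × Int) (char : Char) :
    List Char × List Int × List Int × Int :=
  let (line, bus_lines, t_plus, t) := st
  if char ≠ 'x' ∧ char ≠ ',' then (line ++ [char], bus_lines, t_plus, t)
  else if char = ',' then
    if line ≠ [] then ([], bus_lines ++ [(PySem.Int.ofChars? line).getD 0], t_plus ++ [t], t + 1)
    else (line, bus_lines, t_plus, t + 1)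
  else st

def flushA (st : List Char × List Int × List Int × Int) : List Int × List Int :=
  let (line, bus_lines, t_plus, t) := st
  if line ≠ [] then (bus_lines ++ [(PySem.Int.ofChars? line).getD 0], t_plus ++ [t])
  else (bus_lines, t_plus)

def get_busses (input : List String) : List Int × List Int :=
  let lines_raw := (PySem.List.pyGet? input 1).getD ""   -- input[1]; Pre_ excludes the IndexError
  flushA (lines_raw.toList.foldl stepA ([], [], [], 0))

-- ===== PORT B =====
-- B-side helper: one iteration of B's loop over enumerate(fields).
def stepB (acc : List Int × List Int) (p : Int × List Char) : List Int × List Int :=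
  let field := PySem.Chars.replace p.2 ['x'] []
  if field ≠ [] then (acc.1 ++ [(PySem.Int.ofChars? field).getD 0], acc.2 ++ [p.1])
  else acc

def get_busses_alt (input : List String) : List Int × List Int :=
  let fields := PySem.Chars.splitOn ((PySem.List.pyGet? input 1).getD "").toList [',']
  (PySem.List.enumerate fields).foldl stepB ([], [])

-- ===== PRECONDITION & SPEC =====
-- Pre_ excludes exactly the inputs on which Python A raises: len(input) < 2 (IndexError) and
-- lines where some ','-field, after deleting 'x' characters, is non-empty but not int()-parsable (ValueError).
def Pre_get_busses (input : List String) : Prop :=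
  2 ≤ input.length ∧
  ∀ f ∈ PySem.Chars.splitOn ((input.getD 1 "").toList) [','],
    f.filter (· ≠ 'x') = [] ∨ (PySem.Int.ofChars? (f.filter (· ≠ 'x'))).isSome = true
instance (input : List String) : Decidable (Pre_get_busses input) := by unfold Pre_get_busses; infer_instance

def pvWitness_get_busses : List String := ["939", "7,13,x,x,59,x,31,19"]

def Spec_get_busses (input : List String) (out : List Int × List Int) : Prop := out = get_busses_alt input
instance (input : List String) (out : List Int × List Int) : Decidable (Spec_get_busses input out) := by unfold Spec_get_busses; infer_instance

-- ===== CLAIM (what is proved, stated in full; the proofs are below) =====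
def Claim_equal_get_busses : Prop := ∀ (input : List String), Dom_get_busses input → Pre_get_busses input → Spec_get_busses input (get_busses input)

-- ===== LEMMAS AND PROOFS =====

-- A simple structural recursion computing (first field, remaining fields) of a ','-split.
def split1 : List Char → List Char × List (List Char)
  | [] => ([], [])
  | c :: t =>
    let r := split1 t
    if c = ',' then ([], r.1 :: r.2) else (c :: r.1, r.2)

-- Reference token-level pass: B's loop, with fields pre-filtered through `filter (· ≠ 'x')`.
def procB (bus tp : List Int) (k : Int) : List (List Char) → List Int × List Int
  | [] => (bus, tp)
  | f :: fs =>
    let g := f.filter (· ≠ 'x')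
    if g ≠ [] then procB (bus ++ [(PySem.Int.ofChars? g).getD 0]) (tp ++ [k]) (k + 1) fs
    else procB bus tp (k + 1) fs

theorem replace_go_filter (fuel : Nat) : ∀ (l acc : List Char), l.length ≤ fuel →
    PySem.Chars.replace.go ['x'] [] fuel l acc = acc.reverse ++ l.filter (· ≠ 'x') := by
  induction fuel with
  | zero =>
    intro l acc h
    have : l = [] := List.eq_nil_of_length_eq_zero (Nat.le_zero.mp h)
    subst this; simp [PySem.Chars.replace.go]
  | succ n ih =>
    intro l acc h
    cases l with
    | nil => simp [PySem.Chars.replace.go]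
    | cons c t =>
      have hstep : PySem.Chars.replace.go ['x'] [] (n+1) (c :: t) acc =
          if ('x' == c && List.isPrefixOf [] t) then
            PySem.Chars.replace.go ['x'] [] n (List.drop 1 (c :: t)) ([].reverse ++ acc)
          else PySem.Chars.replace.go ['x'] [] n t (c :: acc) := rfl
      rw [hstep]
      by_cases hc : c = 'x'
      · subst hc
        rw [if_pos (by simp)]
        rw [List.drop_one, List.tail_cons, List.reverse_nil, List.nil_append,
          ih t acc (by simpa using h)]
        simp
      · rw [if_neg (by simp [Ne.symm hc])]
        rw [ih t (c :: acc) (by simpa using h)]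
        simp [hc]

-- s.replace("x", "") deletes the 'x' characters.
theorem replace_filter (cs : List Char) :
    PySem.Chars.replace cs ['x'] [] = cs.filter (· ≠ 'x') := by
  have := replace_go_filter cs.length cs [] (le_refl _)
  simpa [PySem.Chars.replace] using this

theorem splitOn_go_split1 (fuel : Nat) : ∀ (l cur : List Char) (acc : List (List Char)),
    l.length ≤ fuel →
    PySem.Chars.splitOn.go [','] fuel l cur acc =
      acc.reverse ++ ((cur.reverse ++ (split1 l).1) :: (split1 l).2) := by
  induction fuel with
  | zero =>
    intro l cur acc h
    have : l = [] := List.eq_nil_of_length_eq_zero (Nat.le_zero.mp h)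
    subst this; simp [PySem.Chars.splitOn.go, split1]
  | succ n ih =>
    intro l cur acc h
    cases l with
    | nil => simp [PySem.Chars.splitOn.go, split1]
    | cons c t =>
      have hstep : PySem.Chars.splitOn.go [','] (n+1) (c :: t) cur acc =
          if (',' == c && List.isPrefixOf [] t) then
            PySem.Chars.splitOn.go [','] n (List.drop 1 (c :: t)) [] (cur.reverse :: acc)
          else PySem.Chars.splitOn.go [','] n t (c :: cur) acc := rfl
      rw [hstep]
      by_cases hc : c = ','
      · subst hc
        rw [if_pos (by simp), List.drop_one, List.tail_cons,
          ih t [] _ (by simpa using h)]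
        simp [split1]
      · rw [if_neg (by simp [Ne.symm hc]), ih t (c :: cur) acc (by simpa using h)]
        have hsp : split1 (c :: t) = (c :: (split1 t).1, (split1 t).2) := by
          simp [split1, hc]
        rw [hsp]
        simp

-- s.split(",") computed by the simple structural recursion split1.
theorem splitOn_split1 (cs : List Char) :
    PySem.Chars.splitOn cs [','] = (split1 cs).1 :: (split1 cs).2 := by
  have := splitOn_go_split1 (cs.length + 1) cs [] [] (by omega)
  simpa [PySem.Chars.splitOn] using this

theorem flushA_eq (line : List Char) (bus tp : List Int) (t : Int) :
    flushA (line, bus, tp, t) =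
      if line ≠ [] then (bus ++ [(PySem.Int.ofChars? line).getD 0], tp ++ [t]) else (bus, tp) := rfl

theorem procB_cons (bus tp : List Int) (k : Int) (f : List Char) (fs : List (List Char)) :
    procB bus tp k (f :: fs) =
      if f.filter (· ≠ 'x') ≠ [] then
        procB (bus ++ [(PySem.Int.ofChars? (f.filter (· ≠ 'x'))).getD 0]) (tp ++ [k]) (k + 1) fs
      else procB bus tp (k + 1) fs := rfl

-- procB looks at the head field only through its 'x'-filter.
theorem procB_congr_head (bus tp : List Int) (k : Int) (f f' : List Char) (fs : List (List Char))
    (h : f.filter (· ≠ 'x') = f'.filter (· ≠ 'x')) :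
    procB bus tp k (f :: fs) = procB bus tp k (f' :: fs) := by
  simp only [procB, h]

-- Main invariant: running A's machine on cs from state (line, bus, tp, t) and flushing
-- equals the token pass with `line` prefixed to the first ','-field of cs.
theorem machine_eq_proc (cs : List Char) : ∀ (line : List Char) (bus tp : List Int) (t : Int),
    (∀ c ∈ line, c ≠ 'x') →
    flushA (cs.foldl stepA (line, bus, tp, t)) =
      procB bus tp t ((line ++ (split1 cs).1) :: (split1 cs).2) := by
  induction cs with
  | nil =>
    intro line bus tp t h
    have hf : line.filter (· ≠ 'x') = line := List.filter_eq_self.mpr (by simpa using h)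
    rw [List.foldl_nil, flushA_eq, split1, procB_cons]
    simp only [List.append_nil, hf]
    by_cases hl : line = []
    · simp [hl, procB]
    · rw [if_pos hl, if_pos hl, procB]
  | cons c rest ih =>
    intro line bus tp t h
    rw [List.foldl_cons]
    by_cases hc : c = ','
    · subst hc
      have hf : line.filter (· ≠ 'x') = line := List.filter_eq_self.mpr (by simpa using h)
      have hs : stepA (line, bus, tp, t) ',' =
          if line ≠ [] then ([], bus ++ [(PySem.Int.ofChars? line).getD 0], tp ++ [t], t + 1)
          else (line, bus, tp, t + 1) := by
        simp [stepA]
      have hsp : split1 (',' :: rest) = ([], (split1 rest).1 :: (split1 rest).2) := by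
        simp [split1]
      rw [hsp]
      by_cases hl : line = []
      · subst hl
        rw [hs, if_neg (by simp), ih [] bus tp (t + 1) (by simp), List.nil_append]
        conv_rhs => rw [List.nil_append, procB_cons, if_neg (by simp)]
      · rw [hs, if_pos hl, ih [] _ _ (t + 1) (by simp), List.nil_append]
        conv_rhs => rw [List.append_nil, procB_cons, if_pos (by rw [hf]; exact hl), hf]
    · by_cases hx : c = 'x'
      · subst hx
        have hs : stepA (line, bus, tp, t) 'x' = (line, bus, tp, t) := by
          simp [stepA, hc]
        rw [hs, ih line bus tp t h]
        have hsp : split1 ('x' :: rest) = ('x' :: (split1 rest).1, (split1 rest).2) := by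
          simp [split1, hc]
        rw [hsp]
        exact (procB_congr_head bus tp t _ _ _ (by simp)).symm
      · have hs : stepA (line, bus, tp, t) c = (line ++ [c], bus, tp, t) := by
          simp [stepA, hx, hc]
        rw [hs, ih (line ++ [c]) bus tp t (by
          intro d hd
          rcases List.mem_append.mp hd with h1 | h1
          · exact h d h1
          · simp at h1; subst h1; exact hx)]
        have hsp : split1 (c :: rest) = (c :: (split1 rest).1, (split1 rest).2) := by
          simp [split1, hc]
        rw [hsp]
        simp

-- B's enumerate-fold equals the reference token pass (replace rewritten to filter).
theorem foldB_eq_procB (fields : List (List Char)) : ∀ (bus tp : List Int) (k : Int),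
    (PySem.List.enumerate fields k).foldl stepB (bus, tp) = procB bus tp k fields := by
  induction fields with
  | nil => intro bus tp k; simp [PySem.List.enumerate_nil, procB]
  | cons f fs ih =>
    intro bus tp k
    rw [PySem.List.enumerate_cons, List.foldl_cons]
    have hsB : stepB (bus, tp) (k, f) =
        if f.filter (· ≠ 'x') ≠ [] then
          (bus ++ [(PySem.Int.ofChars? (f.filter (· ≠ 'x'))).getD 0], tp ++ [k])
        else (bus, tp) := by
      simp [stepB, replace_filter]
    rw [hsB, procB_cons]
    by_cases hg : f.filter (· ≠ 'x') = []
    · rw [if_neg (by simpa using hg), if_neg (by simpa using hg)]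
      exact ih bus tp (k + 1)
    · rw [if_pos hg, if_pos hg]
      exact ih _ _ (k + 1)

-- ===== VERDICT (by name: the statement is the Claim_ definition above) =====
theorem get_busses_spec : Claim_equal_get_busses := by
  intro input _hdom _hpre
  unfold Spec_get_busses get_busses get_busses_alt
  rw [foldB_eq_procB, splitOn_split1, machine_eq_proc _ [] [] [] 0 (by simp)]
  simp
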